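-- pv_equiv track=rewrite | github.com/Atum555/College | FP/QP08/exercise5.py | soup
-- ===== SOURCE A (Python) =====
-- def soup(matrix, word):
--     def soup_rec(matrix, word, line, col):
--         if word == "": return True
--         if matrix[line][col] != word[0]: return False
--         for l in [line-1,line,line+1]:
--             for c in [col-1,col,col+1]:
--                 if l != line and c != col: continue
--                 if l == line and c == col: continue
--                 try:
--                     if soup_rec(matrix, word[1:], l, c): return True
--                 except: pass
--         return False
--     for l in range(len(matrix)):
--         for c in range(len(matrix[0])):
--             if soup_rec(matrix, word, l, c): return f"{chr(ord('A')+l)}{c+1}"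
-- ===== SOURCE B (Python) =====
-- def soup(matrix, word):
--     memo = {}
--
--     def ok(i, l, c):
--         if i == len(word):
--             return True
--         key = (i, l, c)
--         if key not in memo:
--             try:
--                 match = matrix[l][c] == word[i]
--             except IndexError:
--                 match = False
--             memo[key] = match and (ok(i + 1, l - 1, c) or ok(i + 1, l, c - 1)
--                                    or ok(i + 1, l, c + 1) or ok(i + 1, l + 1, c))
--         return memo[key]
--
--     for l in range(len(matrix)):
--         for c in range(len(matrix[0])):
--             if ok(0, l, c):
--                 return f"{chr(ord('A')+l)}{c+1}"
-- ===== Notes on version B (the rewrite author's own statement) =====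
-- stated objective: alternative
-- what changed: Replaces A's naive exponential recursive backtracking over word suffixes with a memoized search over (word-index, row, col) states, each solved once; Pre_ excludes ragged matrices with a row shorter than row 0 under a nonempty word, on which A's unprotected top-level indexing can raise IndexError.
-- outside the precondition, e.g. on soup([['a', 'b'], ['a']], 'ab'): A returns 'A1', B returns 'A1'; on soup([['a', 'b'], ['c']], 'zz'): A raises IndexError, B returns None
import Mathlib
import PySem

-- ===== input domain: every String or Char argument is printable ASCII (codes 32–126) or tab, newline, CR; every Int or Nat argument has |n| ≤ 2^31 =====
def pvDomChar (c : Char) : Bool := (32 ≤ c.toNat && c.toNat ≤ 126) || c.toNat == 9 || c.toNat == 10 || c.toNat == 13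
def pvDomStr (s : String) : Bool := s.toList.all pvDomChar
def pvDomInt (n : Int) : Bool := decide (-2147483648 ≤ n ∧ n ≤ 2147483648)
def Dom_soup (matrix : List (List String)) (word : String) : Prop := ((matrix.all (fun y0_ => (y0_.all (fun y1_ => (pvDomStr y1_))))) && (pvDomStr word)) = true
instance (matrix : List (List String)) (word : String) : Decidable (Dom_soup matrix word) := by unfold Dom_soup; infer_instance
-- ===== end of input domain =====

-- B replaces A's recursive backtracking with a memoized search over
-- (word-index, row, col) states, each solved once (objective: alternative).

-- ===== PORT A =====
-- soup_rec: the inner recursive search; an IndexError (pyGet? = none) raised at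
-- the lookup is caught by the caller's try/except and treated as False (under
-- Pre_soup the one unprotected top-level lookup is always in range).
def soupRecA (matrix : List (List String)) : List Char → Int → Int → Bool
  | [], _, _ => true
  | ch :: rest, line, col =>
    match PySem.List.pyGet? matrix line with
    | none => false
    | some row =>
      match PySem.List.pyGet? row col with
      | none => false
      | some cell =>
        if cell = String.ofList [ch] then
          soupRecA matrix rest (line - 1) col || soupRecA matrix rest line (col - 1) ||
            soupRecA matrix rest line (col + 1) || soupRecA matrix rest (line + 1) col
        else false

def soup (matrix : List (List String)) (word : String) : Option String :=
  (List.range matrix.length).findSome? fun (l : Nat) =>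
    (List.range (matrix.headD []).length).findSome? fun (c : Nat) =>
      if soupRecA matrix word.toList (l : Int) (c : Int) then
        some (String.ofList [Char.ofNat ((65 : Nat) + l)] ++ PySem.Int.toStr ((c : Int) + 1))
      else none

-- ===== PORT B =====
-- matrix[l][c] == word[i] of Source B (IndexError, i.e. pyGet? = none, gives False).
def matchB (matrix : List (List String)) (l c : Int) (ch : Char) : Bool :=
  match PySem.List.pyGet? matrix l with
  | none => false
  | some row =>
    match PySem.List.pyGet? row c with
    | none => false
    | some cell => cell == String.ofList [ch]

-- ok(i, l, c) of Source B, threading the memo dict; the word suffix word[i:] is the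
-- recursion argument, i only keys the memo.
def okB (matrix : List (List String)) : List Char → Nat → Int → Int →
    PySem.Dict (Nat × Int × Int) Bool → Bool × PySem.Dict (Nat × Int × Int) Bool
  | [], _, _, _, memo => (true, memo)
  | ch :: rest, i, l, c, memo =>
    match memo.get? (i, l, c) with
    | some v => (v, memo)
    | none =>
      if matchB matrix l c ch then
        let p1 := okB matrix rest (i + 1) (l - 1) c memo
        if p1.1 then (true, p1.2.insert (i, l, c) true) else
        let p2 := okB matrix rest (i + 1) l (c - 1) p1.2
        if p2.1 then (true, p2.2.insert (i, l, c) true) else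
        let p3 := okB matrix rest (i + 1) l (c + 1) p2.2
        if p3.1 then (true, p3.2.insert (i, l, c) true) else
        let p4 := okB matrix rest (i + 1) (l + 1) c p3.2
        (p4.1, p4.2.insert (i, l, c) p4.1)
      else (false, memo.insert (i, l, c) false)

-- the inner 'for c in range(len(matrix[0]))' loop, memo threaded across cells
def scanColsB (matrix : List (List String)) (w : List Char) (l : Nat) :
    List Nat → PySem.Dict (Nat × Int × Int) Bool →
      Option String × PySem.Dict (Nat × Int × Int) Bool
  | [], memo => (none, memo)
  | c :: cs, memo =>
    let p := okB matrix w 0 (l : Int) (c : Int) memo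
    if p.1 then
      (some (String.ofList [Char.ofNat ((65 : Nat) + l)] ++ PySem.Int.toStr ((c : Int) + 1)), p.2)
    else scanColsB matrix w l cs p.2

-- the outer 'for l in range(len(matrix))' loop
def scanRowsB (matrix : List (List String)) (w : List Char) :
    List Nat → PySem.Dict (Nat × Int × Int) Bool → Option String
  | [], _ => none
  | l :: ls, memo =>
    match scanColsB matrix w l (List.range (matrix.headD []).length) memo with
    | (some s, _) => some s
    | (none, memo') => scanRowsB matrix w ls memo'

def soup_alt (matrix : List (List String)) (word : String) : Option String :=
  scanRowsB matrix word.toList (List.range matrix.length) PySem.Dict.empty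

-- ===== PRECONDITION & SPEC =====
-- Pre_soup excludes the inputs on which A raises an uncaught IndexError: with a
-- nonempty word the top-level call indexes column c < len(matrix[0]) of every
-- row without a try, so a row shorter than row 0 can raise; ragged matrices with
-- a shorter row are excluded (on some of them A still returns, having found the
-- word before reaching the bad cell — see cites).
def Pre_soup (matrix : List (List String)) (word : String) : Prop :=
  word = "" ∨ ∀ row ∈ matrix, (matrix.headD []).length ≤ row.length
instance (matrix : List (List String)) (word : String) : Decidable (Pre_soup matrix word) := by
  unfold Pre_soup; infer_instance

def pvWitness_soup : List (List String) × String := ([["a", "b"], ["c", "a"]], "ab")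

def Spec_soup (matrix : List (List String)) (word : String) (out : Option String) : Prop := out = soup_alt matrix word
instance (matrix : List (List String)) (word : String) (out : Option String) : Decidable (Spec_soup matrix word out) := by unfold Spec_soup; infer_instance

-- ===== CLAIM (what is proved, stated in full; the proofs are below) =====
def Claim_equal_soup : Prop := ∀ (matrix : List (List String)) (word : String), Dom_soup matrix word → Pre_soup matrix word → Spec_soup matrix word (soup matrix word)

-- ===== LEMMAS AND PROOFS =====

-- A's recursion, restated through B's cell test
theorem soupRecA_cons (matrix : List (List String)) (ch : Char) (rest : List Char)
    (l c : Int) :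
    soupRecA matrix (ch :: rest) l c =
      (matchB matrix l c ch &&
        (soupRecA matrix rest (l - 1) c || soupRecA matrix rest l (c - 1) ||
          soupRecA matrix rest l (c + 1) || soupRecA matrix rest (l + 1) c)) := by
  simp only [soupRecA, matchB]
  rcases hl : PySem.List.pyGet? matrix l with _ | row
  · simp
  · rcases hc : PySem.List.pyGet? row c with _ | cell
    · simp [hc]
    · by_cases he : cell = String.ofList [ch] <;> simp [hc, he]

-- the memo invariant: every stored value is the answer of A's pure recursion on
-- the corresponding word suffix
def InvB (matrix : List (List String)) (w : List Char)
    (memo : PySem.Dict (Nat × Int × Int) Bool) : Prop :=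
  ∀ (i : Nat) (l c : Int) (v : Bool),
    memo.get? (i, l, c) = some v → soupRecA matrix (w.drop i) l c = v

theorem invB_insert {matrix : List (List String)} {w : List Char}
    {memo : PySem.Dict (Nat × Int × Int) Bool} (h : InvB matrix w memo)
    {i : Nat} {l c : Int} {v : Bool} (hv : soupRecA matrix (w.drop i) l c = v) :
    InvB matrix w (memo.insert (i, l, c) v) := by
  intro i' l' c' v' hget
  rw [PySem.Dict.get?_insert] at hget
  split_ifs at hget with hk
  · cases hget
    simp only [Prod.mk.injEq] at hk
    rcases hk with ⟨h1, h2, h3⟩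
    subst h1; subst h2; subst h3
    exact hv
  · exact h i' l' c' v' hget

theorem okB_correct (matrix : List (List String)) (w : List Char) :
    ∀ (rest : List Char) (i : Nat) (l c : Int)
      (memo : PySem.Dict (Nat × Int × Int) Bool),
      rest = w.drop i → InvB matrix w memo →
      (okB matrix rest i l c memo).1 = soupRecA matrix rest l c ∧
        InvB matrix w (okB matrix rest i l c memo).2 := by
  intro rest
  induction rest with
  | nil =>
    intro i l c memo _ hinv
    exact ⟨rfl, hinv⟩
  | cons ch rest ih =>
    intro i l c memo hdrop hinv
    have hdrop' : rest = w.drop (i + 1) := by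
      have : w.drop (i + 1) = (w.drop i).drop 1 := by
        rw [List.drop_drop]
      rw [this, ← hdrop]; rfl
    simp only [okB]
    cases hget : memo.get? (i, l, c) with
    | some v =>
      refine ⟨?_, hinv⟩
      have := hinv i l c v hget
      rw [← hdrop] at this
      exact this.symm
    | none =>
      by_cases hm : matchB matrix l c ch = true
      · rw [if_pos hm]
        obtain ⟨h1v, h1i⟩ := ih (i + 1) (l - 1) c memo hdrop' hinv
        by_cases hr1 : (okB matrix rest (i + 1) (l - 1) c memo).1 = true
        · rw [if_pos hr1]
          have hval : soupRecA matrix (ch :: rest) l c = true := by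
            rw [soupRecA_cons, hm, ← h1v, hr1]; simp
          refine ⟨hval.symm, invB_insert h1i ?_⟩
          rw [← hdrop]; exact hval
        · rw [if_neg hr1]
          obtain ⟨h2v, h2i⟩ := ih (i + 1) l (c - 1) (okB matrix rest (i + 1) (l - 1) c memo).2 hdrop' h1i
          by_cases hr2 : (okB matrix rest (i + 1) l (c - 1) (okB matrix rest (i + 1) (l - 1) c memo).2).1 = true
          · rw [if_pos hr2]
            have hval : soupRecA matrix (ch :: rest) l c = true := by
              rw [soupRecA_cons, hm, ← h2v, hr2]; simp
            refine ⟨hval.symm, invB_insert h2i ?_⟩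
            rw [← hdrop]; exact hval
          · rw [if_neg hr2]
            obtain ⟨h3v, h3i⟩ := ih (i + 1) l (c + 1) _ hdrop' h2i
            by_cases hr3 : (okB matrix rest (i + 1) l (c + 1) (okB matrix rest (i + 1) l (c - 1) (okB matrix rest (i + 1) (l - 1) c memo).2).2).1 = true
            · rw [if_pos hr3]
              have hval : soupRecA matrix (ch :: rest) l c = true := by
                rw [soupRecA_cons, hm, ← h3v, hr3]; simp
              refine ⟨hval.symm, invB_insert h3i ?_⟩
              rw [← hdrop]; exact hval
            · rw [if_neg hr3]
              obtain ⟨h4v, h4i⟩ := ih (i + 1) (l + 1) c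
                (okB matrix rest (i + 1) l (c + 1)
                  (okB matrix rest (i + 1) l (c - 1)
                    (okB matrix rest (i + 1) (l - 1) c memo).2).2).2 hdrop' h3i
              have hval : soupRecA matrix (ch :: rest) l c =
                  (okB matrix rest (i + 1) (l + 1) c
                    (okB matrix rest (i + 1) l (c + 1)
                      (okB matrix rest (i + 1) l (c - 1)
                        (okB matrix rest (i + 1) (l - 1) c memo).2).2).2).1 := by
                rw [soupRecA_cons, hm, ← h1v, ← h2v, ← h3v, ← h4v]
                simp only [Bool.not_eq_true] at hr1 hr2 hr3
                rw [hr1, hr2, hr3]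
                simp
              refine ⟨hval.symm, invB_insert h4i ?_⟩
              rw [← hdrop]; exact hval
      · rw [if_neg hm]
        have hval : soupRecA matrix (ch :: rest) l c = false := by
          rw [soupRecA_cons]
          simp only [Bool.not_eq_true] at hm
          rw [hm]; simp
        refine ⟨hval.symm, invB_insert hinv ?_⟩
        rw [← hdrop]; exact hval

theorem scanColsB_correct (matrix : List (List String)) (w : List Char) (l : Nat) :
    ∀ (cols : List Nat) (memo : PySem.Dict (Nat × Int × Int) Bool),
      InvB matrix w memo →
      (scanColsB matrix w l cols memo).1 =
        (cols.findSome? fun (c : Nat) =>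
          if soupRecA matrix w (l : Int) (c : Int) then
            some (String.ofList [Char.ofNat ((65 : Nat) + l)] ++ PySem.Int.toStr ((c : Int) + 1))
          else none) ∧
        InvB matrix w (scanColsB matrix w l cols memo).2 := by
  intro cols
  induction cols with
  | nil => intro memo hinv; exact ⟨rfl, hinv⟩
  | cons c cs ih =>
    intro memo hinv
    obtain ⟨hv, hi⟩ := okB_correct matrix w w 0 (l : Int) (c : Int) memo (by simp) hinv
    simp only [scanColsB, List.findSome?_cons]
    by_cases hr : (okB matrix w 0 (l : Int) (c : Int) memo).1 = true
    · rw [if_pos hr, ← hv, hr]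
      exact ⟨rfl, hi⟩
    · rw [if_neg hr]
      have : soupRecA matrix w (l : Int) (c : Int) = false := by
        rw [← hv]; simpa using hr
      rw [this]
      simpa using ih (okB matrix w 0 (l : Int) (c : Int) memo).2 hi

theorem scanRowsB_correct (matrix : List (List String)) (w : List Char) :
    ∀ (rows : List Nat) (memo : PySem.Dict (Nat × Int × Int) Bool),
      InvB matrix w memo →
      scanRowsB matrix w rows memo =
        (rows.findSome? fun (l : Nat) =>
          (List.range (matrix.headD []).length).findSome? fun (c : Nat) =>
            if soupRecA matrix w (l : Int) (c : Int) then
              some (String.ofList [Char.ofNat ((65 : Nat) + l)] ++ PySem.Int.toStr ((c : Int) + 1))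
            else none) := by
  intro rows
  induction rows with
  | nil => intro memo _; rfl
  | cons l ls ih =>
    intro memo hinv
    obtain ⟨hv, hi⟩ := scanColsB_correct matrix w l (List.range (matrix.headD []).length) memo hinv
    simp only [scanRowsB, List.findSome?_cons]
    cases hres : (scanColsB matrix w l (List.range (matrix.headD []).length) memo) with
    | mk o memo' =>
      rw [hres] at hv hi
      cases o with
      | some s => simp only at hv ⊢; rw [← hv]
      | none =>
        simp only at hv hi ⊢
        rw [← hv]
        exact ih memo' hi

-- ===== VERDICT (by name: the statement is the Claim_ definition above) =====
theorem soup_spec : Claim_equal_soup := by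
  intro matrix word _ _
  unfold Spec_soup soup soup_alt
  rw [scanRowsB_correct matrix word.toList (List.range matrix.length) PySem.Dict.empty]
  intro i l c v hget
  rw [PySem.Dict.get?_empty] at hget
  cases hget
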